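-- pv_equiv track=rewrite | github.com/pypi-data/pypi-mirror-389 | packages/clauxton/clauxton-0.15.0.tar.gz/clauxton-0.15.0/clauxton/tui/keybindings.py | format_key_for_display
-- ===== SOURCE A (Python) =====
-- def format_key_for_display(key: str) -> str:
--     """
--     Format key for display in help.
--
--     Args:
--         key: Key to format
--
--     Returns:
--         Formatted key string
--     """
--     # Convert internal key names to display format
--     replacements = {
--         "ctrl": "Ctrl",
--         "shift": "Shift",
--         "alt": "Alt",
--         "question_mark": "?",
--         "slash": "/",
--         "escape": "Esc",
--         "tab": "Tab",
--     }
--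
--     result = key
--     for old, new in replacements.items():
--         result = result.replace(old, new)
--
--     # Capitalize single letters
--     if len(result) == 1:
--         result = result.upper()
--
--     return result
-- ===== SOURCE B (Python) =====
-- def format_key_for_display(key: str) -> str:
--     """Single left-to-right scan with a for/else dispatch instead of seven cascaded full-string replaces."""
--     replacements = (
--         ("ctrl", "Ctrl"),
--         ("shift", "Shift"),
--         ("alt", "Alt"),
--         ("question_mark", "?"),
--         ("slash", "/"),
--         ("escape", "Esc"),
--         ("tab", "Tab"),
--     )
--     out = []
--     i = 0
--     n = len(key)
--     while i < n:
--         for old, new in replacements: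
--             if key.startswith(old, i):
--                 out.append(new)
--                 i += len(old)
--                 break
--         else:
--             out.append(key[i])
--             i += 1
--     result = "".join(out)
--     if len(result) == 1:
--         result = result.upper()
--     return result
-- ===== Notes on version B (the rewrite author's own statement) =====
-- stated objective: alternative
-- what changed: Replaces seven cascaded full-string .replace passes (each building a new intermediate string) by one left-to-right scan that matches the seven tokens positionally and emits the output in a single pass.
-- outside the precondition, e.g. on format_key_for_display('altab'): A returns 'AlTab', B returns 'Altab'; on format_key_for_display('shiftab'): A returns 'ShifTab', B returns 'Shiftab'; on format_key_for_display('slashift'): A returns 'slaShift', B returns '/ift'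
import Mathlib
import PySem

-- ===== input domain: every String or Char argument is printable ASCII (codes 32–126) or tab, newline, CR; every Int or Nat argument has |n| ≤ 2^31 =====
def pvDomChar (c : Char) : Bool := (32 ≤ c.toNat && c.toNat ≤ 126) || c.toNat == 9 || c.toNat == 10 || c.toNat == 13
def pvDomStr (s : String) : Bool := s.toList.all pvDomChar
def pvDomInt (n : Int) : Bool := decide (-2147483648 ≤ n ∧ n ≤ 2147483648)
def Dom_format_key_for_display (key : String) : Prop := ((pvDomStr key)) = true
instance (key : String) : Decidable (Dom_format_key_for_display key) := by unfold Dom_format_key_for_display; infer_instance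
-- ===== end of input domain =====

set_option maxRecDepth 2048

-- B replaces A's seven cascaded full-string .replace passes by one left-to-right scan
-- that matches the seven tokens positionally and emits the output in a single pass.

-- ===== PORT A =====
-- the dict literal is iterated in insertion order; ported as a list of pairs folded with str.replace
def format_key_for_display (key : String) : String :=
  let replacements : List (String × String) :=
    [("ctrl", "Ctrl"), ("shift", "Shift"), ("alt", "Alt"), ("question_mark", "?"),
     ("slash", "/"), ("escape", "Esc"), ("tab", "Tab")]
  let result := replacements.foldl (fun r pr => PySem.Str.replace r pr.1 pr.2) key
  if PySem.Str.len result == 1 then PySem.Str.upper result else result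

-- ===== PORT B =====
-- B's while/for-else scan: at each position try the seven tokens in order (startswith),
-- emit the replacement and jump, else emit the character.  The loop index advancing to
-- the end of the string is rendered as structural recursion on a fuel that starts at the
-- string length (a pure totality guard: each step consumes at least one character, so
-- the fuel never runs out); the final "".join of the appended pieces is the
-- concatenation the recursion builds.
def fkdScanGo : Nat → List Char → List Char
  | _, [] => []
  | 0, _ :: _ => []   -- unreachable: the scan consumes at least one character per fuel unit
  | fuel + 1, c :: t =>
    if PySem.Chars.startswith (c :: t) ['c','t','r','l'] then
      ['C','t','r','l'] ++ fkdScanGo fuel (t.drop 3)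
    else if PySem.Chars.startswith (c :: t) ['s','h','i','f','t'] then
      ['S','h','i','f','t'] ++ fkdScanGo fuel (t.drop 4)
    else if PySem.Chars.startswith (c :: t) ['a','l','t'] then
      ['A','l','t'] ++ fkdScanGo fuel (t.drop 2)
    else if PySem.Chars.startswith (c :: t) ['q','u','e','s','t','i','o','n','_','m','a','r','k'] then
      ['?'] ++ fkdScanGo fuel (t.drop 12)
    else if PySem.Chars.startswith (c :: t) ['s','l','a','s','h'] then
      ['/'] ++ fkdScanGo fuel (t.drop 4)
    else if PySem.Chars.startswith (c :: t) ['e','s','c','a','p','e'] then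
      ['E','s','c'] ++ fkdScanGo fuel (t.drop 5)
    else if PySem.Chars.startswith (c :: t) ['t','a','b'] then
      ['T','a','b'] ++ fkdScanGo fuel (t.drop 2)
    else c :: fkdScanGo fuel t

def format_key_for_display_alt (key : String) : String :=
  let result := String.ofList (fkdScanGo key.toList.length key.toList)
  if PySem.Str.len result == 1 then PySem.Str.upper result else result

-- ===== PRECONDITION & SPEC =====
-- Pre_ excludes keys containing "altab", "shiftab" or "slashift": there A's cascaded
-- replaces interact across overlapping tokens (a later .replace matches across the
-- boundary of an earlier match or of its replacement text), an accidental corner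
-- value (e.g. "AlTab") that no single-pass reading of the token table would produce.
def Pre_format_key_for_display (key : String) : Prop :=
  PySem.Str.isIn "altab" key = false ∧ PySem.Str.isIn "shiftab" key = false ∧
    PySem.Str.isIn "slashift" key = false
instance (key : String) : Decidable (Pre_format_key_for_display key) := by
  unfold Pre_format_key_for_display; infer_instance

def pvWitness_format_key_for_display : String := "ctrl+shift+q"

def Spec_format_key_for_display (key : String) (out : String) : Prop := out = format_key_for_display_alt key
instance (key : String) (out : String) : Decidable (Spec_format_key_for_display key out) := by unfold Spec_format_key_for_display; infer_instance

-- ===== CLAIM (what is proved, stated in full; the proofs are below) =====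
def Claim_equal_format_key_for_display : Prop := ∀ (key : String), Dom_format_key_for_display key → Pre_format_key_for_display key → Spec_format_key_for_display key (format_key_for_display key)

-- ===== LEMMAS AND PROOFS =====

-- A natural structural recursion computing what PySem.Chars.replace computes.
def repl (p v : List Char) : List Char → List Char
  | [] => []
  | c :: t =>
    if p.isPrefixOf (c :: t) then v ++ repl p v (List.drop (p.length - 1) t)
    else c :: repl p v t
termination_by l => l.length
decreasing_by all_goals (simp; try omega)

lemma go_eq (p v : List Char) (hp : p ≠ []) :
    ∀ (fuel : Nat) (l acc : List Char), l.length ≤ fuel →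
      PySem.Chars.replace.go p v fuel l acc = acc.reverse ++ repl p v l := by
  intro fuel
  induction fuel with
  | zero =>
    intro l acc hl
    have : l = [] := by cases l <;> simp_all
    subst this
    simp [PySem.Chars.replace.go, repl]
  | succ n ih =>
    intro l acc hl
    cases l with
    | nil => simp [PySem.Chars.replace.go, repl]
    | cons c t =>
      rw [PySem.Chars.replace.go]
      by_cases h : p.isPrefixOf (c :: t)
      · obtain ⟨q, qs, rfl⟩ : ∃ q qs, p = q :: qs := by cases p <;> simp_all
        simp only [h, if_true]
        rw [ih (List.drop (q :: qs).length (c :: t)) (v.reverse ++ acc)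
          (by simp at hl ⊢; omega)]
        simp [repl, h]
      · simp only [h]
        rw [ih t (c :: acc) (by simp at hl; omega)]
        simp [repl, h]

lemma replace_eq_repl (p v l : List Char) (hp : p ≠ []) :
    PySem.Chars.replace l p v = repl p v l := by
  rw [PySem.Chars.replace, if_neg (by simp [List.isEmpty_iff, hp]),
    go_eq p v hp l.length l [] le_rfl]
  simp

lemma repl_nil (p v : List Char) : repl p v [] = [] := by simp [repl]

lemma repl_cons_neg (p v : List Char) (c : Char) (t : List Char)
    (h : ¬ p <+: (c :: t)) : repl p v (c :: t) = c :: repl p v t := by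
  rw [repl, if_neg]
  simpa [List.isPrefixOf_iff_prefix] using h

lemma repl_match (p v t : List Char) (hp : p ≠ []) :
    repl p v (p ++ t) = v ++ repl p v t := by
  obtain ⟨q, qs, rfl⟩ : ∃ q qs, p = q :: qs := by cases p <;> simp_all
  rw [List.cons_append, repl, if_pos]
  · simp [List.drop_append_length]
  · simpa [List.isPrefixOf_iff_prefix] using List.prefix_append (q :: qs) t

lemma repl_append (p v : List Char) :
    ∀ (a y : List Char), (∀ j, j < a.length → ¬ p <+: (a.drop j ++ y)) →
      repl p v (a ++ y) = a ++ repl p v y := by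
  intro a
  induction a with
  | nil => intro y _; rfl
  | cons c a' ih =>
    intro y h
    rw [List.cons_append, repl_cons_neg p v c (a' ++ y)
      (by simpa using h 0 (by simp))]
    rw [ih y (fun j hj => by simpa using h (j + 1) (by simpa using hj))]
    rfl

lemma prefix_of_repl (p v : List Char) (h0 : Char) (hp : p ≠ []) (hv : v.head? = some h0) :
    ∀ (t w : List Char), h0 ∉ w → w <+: repl p v t → w <+: t := by
  intro t
  induction t with
  | nil =>
    intro w _ hw
    simpa [repl] using hw
  | cons c t' ih =>
    intro w hnin hw
    by_cases hpre : p.isPrefixOf (c :: t')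
    · rw [repl, if_pos hpre] at hw
      cases w with
      | nil => exact List.nil_prefix
      | cons d w' =>
        obtain ⟨v', rfl⟩ : ∃ v', v = h0 :: v' := by cases v <;> simp_all
        rw [List.cons_append, List.cons_prefix_cons] at hw
        exact absurd hw.1 (by rintro rfl; exact hnin List.mem_cons_self)
    · rw [repl, if_neg hpre] at hw
      cases w with
      | nil => exact List.nil_prefix
      | cons d w' =>
        rw [List.cons_prefix_cons] at hw
        obtain ⟨rfl, hw'⟩ := hw
        exact List.cons_prefix_cons.mpr
          ⟨rfl, ih w' (fun hm => hnin (List.mem_cons_of_mem _ hm)) hw'⟩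

-- specialisations of prefix_of_repl to the concrete token/replacement pairs
lemma pr_ctrl {t w : List Char} (hn : 'C' ∉ w) :
    w <+: repl ['c','t','r','l'] ['C','t','r','l'] t → w <+: t :=
  prefix_of_repl _ _ 'C' (by simp) rfl t w hn
lemma pr_shift {t w : List Char} (hn : 'S' ∉ w) :
    w <+: repl ['s','h','i','f','t'] ['S','h','i','f','t'] t → w <+: t :=
  prefix_of_repl _ _ 'S' (by simp) rfl t w hn
lemma pr_alt {t w : List Char} (hn : 'A' ∉ w) :
    w <+: repl ['a','l','t'] ['A','l','t'] t → w <+: t :=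
  prefix_of_repl _ _ 'A' (by simp) rfl t w hn
-- the token/replacement table, as lists of characters
def fkdPairs : List (List Char × List Char) :=
  [(['c','t','r','l'], ['C','t','r','l']),
   (['s','h','i','f','t'], ['S','h','i','f','t']),
   (['a','l','t'], ['A','l','t']),
   (['q','u','e','s','t','i','o','n','_','m','a','r','k'], ['?']),
   (['s','l','a','s','h'], ['/']),
   (['e','s','c','a','p','e'], ['E','s','c']),
   (['t','a','b'], ['T','a','b'])]

def chainRepl (ps : List (List Char × List Char)) (t : List Char) : List Char :=
  ps.foldl (fun s pr => repl pr.1 pr.2 s) t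

lemma chain_step (pr : List Char × List Char) (ps : List (List Char × List Char)) (t : List Char) :
    chainRepl (pr :: ps) t = chainRepl ps (repl pr.1 pr.2 t) := rfl

-- tokens are nonempty and no replacement's first character occurs in any token
def sepOK (ps : List (List Char × List Char)) : Prop :=
  ∀ pr ∈ ps, pr.1 ≠ [] ∧ pr.2 ≠ [] ∧ ∀ h0 ∈ pr.2.take 1, ∀ pr' ∈ ps, h0 ∉ pr'.1

lemma sepOK_tail {pr : List Char × List Char} {ps : List (List Char × List Char)}
    (h : sepOK (pr :: ps)) : sepOK ps := by
  intro pr' hm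
  obtain ⟨hne, hne2, hall⟩ := h pr' (List.mem_cons_of_mem _ hm)
  exact ⟨hne, hne2, fun h0 hh0 pr'' hm'' => hall h0 hh0 pr'' (List.mem_cons_of_mem _ hm'')⟩

lemma sepOK_head {pr : List Char × List Char} {ps : List (List Char × List Char)}
    (h : sepOK (pr :: ps)) :
    pr.1 ≠ [] ∧ ∃ h0 v', pr.2 = h0 :: v' ∧ ∀ pr' ∈ pr :: ps, h0 ∉ pr'.1 := by
  obtain ⟨hne, hne2, hall⟩ := h pr List.mem_cons_self
  obtain ⟨h0, v', hv⟩ : ∃ h0 v', pr.2 = h0 :: v' := by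
    cases hv : pr.2 with
    | nil => exact absurd hv hne2
    | cons a b => exact ⟨a, b, rfl⟩
  exact ⟨hne, h0, v', hv, fun pr' hm => hall h0 (by simp [hv]) pr' hm⟩

lemma pv_prefix_append_split :
    ∀ (a w Y : List Char), w <+: a ++ Y → w <+: a ∨ (a <+: w ∧ w.drop a.length <+: Y) := by
  intro a
  induction a with
  | nil =>
    intro w Y h
    right
    exact ⟨List.nil_prefix, by simpa using h⟩
  | cons c a' ih =>
    intro w Y h
    cases w with
    | nil => left; exact List.nil_prefix
    | cons d w' =>
      rw [List.cons_append, List.cons_prefix_cons] at h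
      obtain ⟨rfl, h'⟩ := h
      rcases ih w' Y h' with h1 | ⟨h2, h3⟩
      · left; exact List.cons_prefix_cons.mpr ⟨rfl, h1⟩
      · right; exact ⟨List.cons_prefix_cons.mpr ⟨rfl, h2⟩, by simpa using h3⟩

lemma chain_cons :
    ∀ (ps : List (List Char × List Char)), sepOK ps → ∀ (c : Char) (t : List Char),
      (∀ pr ∈ ps, ¬ pr.1 <+: (c :: t)) →
      chainRepl ps (c :: t) = c :: chainRepl ps t := by
  intro ps
  induction ps with
  | nil => intro _ c t _; rfl
  | cons pr ps' ih =>
    intro hsep c t h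
    rw [chain_step, chain_step,
      repl_cons_neg pr.1 pr.2 c t (h pr List.mem_cons_self)]
    apply ih (sepOK_tail hsep) c (repl pr.1 pr.2 t)
    intro pr' hm hcon
    obtain ⟨hne, h0, v', hv, hall⟩ := sepOK_head hsep
    cases hq : pr'.1 with
    | nil => exact h pr' (List.mem_cons_of_mem _ hm) (hq ▸ List.nil_prefix)
    | cons q rest =>
      rw [hq, List.cons_prefix_cons] at hcon
      obtain ⟨hqc, hrest⟩ := hcon
      have hnin : h0 ∉ rest := fun hmem =>
        hall pr' (List.mem_cons_of_mem _ hm) (by rw [hq]; exact List.mem_cons_of_mem _ hmem)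
      have hrt := prefix_of_repl pr.1 pr.2 h0 hne (by rw [hv]; rfl) t rest hnin hrest
      exact h pr' (List.mem_cons_of_mem _ hm)
        (by rw [hq]; exact List.cons_prefix_cons.mpr ⟨hqc, hrt⟩)

lemma chain_append :
    ∀ (ps : List (List Char × List Char)), sepOK ps → ∀ (a y : List Char),
      (∀ pr ∈ ps, ∀ j, j < a.length → ¬ pr.1 <+: (a.drop j ++ y)) →
      chainRepl ps (a ++ y) = a ++ chainRepl ps y := by
  intro ps
  induction ps with
  | nil => intro _ a y _; rfl
  | cons pr ps' ih =>
    intro hsep a y h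
    rw [chain_step, chain_step,
      repl_append pr.1 pr.2 a y (fun j hj => h pr List.mem_cons_self j hj)]
    apply ih (sepOK_tail hsep) a (repl pr.1 pr.2 y)
    intro pr' hm j hj hcon
    obtain ⟨hne, h0, v', hv, hall⟩ := sepOK_head hsep
    rcases pv_prefix_append_split (a.drop j) pr'.1 (repl pr.1 pr.2 y) hcon with h1 | ⟨h2, h3⟩
    · exact h pr' (List.mem_cons_of_mem _ hm) j hj (List.prefix_append_of_prefix h1)
    · have hnin : h0 ∉ pr'.1.drop (a.drop j).length := fun hmem =>
        hall pr' (List.mem_cons_of_mem _ hm) (List.mem_of_mem_drop hmem)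
      have hy := prefix_of_repl pr.1 pr.2 h0 hne (by rw [hv]; rfl) y _ hnin h3
      have heq : a.drop j ++ pr'.1.drop (a.drop j).length = pr'.1 :=
        List.prefix_iff_eq_append.mp h2
      exact h pr' (List.mem_cons_of_mem _ hm) j hj
        (by rw [← heq]; exact (List.prefix_append_right_inj _).mpr hy)

-- no key contains one of the three cross-boundary overlap patterns
def GoodK (l : List Char) : Prop :=
  ¬ (['a','l','t','a','b'] <:+: l) ∧ ¬ (['s','h','i','f','t','a','b'] <:+: l) ∧
    ¬ (['s','l','a','s','h','i','f','t'] <:+: l)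

lemma good_mono {u l : List Char} (h : u <:+: l) (hg : GoodK l) : GoodK u :=
  ⟨fun hc => hg.1 (hc.trans h), fun hc => hg.2.1 (hc.trans h), fun hc => hg.2.2 (hc.trans h)⟩

lemma sep_all : sepOK fkdPairs := by
  unfold fkdPairs
  intro pr hm
  fin_cases hm <;> refine ⟨by simp, by simp, ?_⟩ <;>
    (intro h0 hh0 pr' hm'; simp at hh0; subst hh0; fin_cases hm' <;> simp)

lemma sep_pre2 : sepOK [(['c','t','r','l'], ['C','t','r','l'])] := by
  intro pr hm
  fin_cases hm <;> refine ⟨by simp, by simp, ?_⟩ <;>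
    (intro h0 hh0 pr' hm'; simp at hh0; subst hh0; fin_cases hm' <;> simp)

lemma sep_pre3 : sepOK [(['c','t','r','l'], ['C','t','r','l']), (['s','h','i','f','t'], ['S','h','i','f','t'])] := by
  intro pr hm
  fin_cases hm <;> refine ⟨by simp, by simp, ?_⟩ <;>
    (intro h0 hh0 pr' hm'; simp at hh0; subst hh0; fin_cases hm' <;> simp)

lemma sep_pre4 : sepOK [(['c','t','r','l'], ['C','t','r','l']), (['s','h','i','f','t'], ['S','h','i','f','t']), (['a','l','t'], ['A','l','t'])] := by
  intro pr hm
  fin_cases hm <;> refine ⟨by simp, by simp, ?_⟩ <;>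
    (intro h0 hh0 pr' hm'; simp at hh0; subst hh0; fin_cases hm' <;> simp)

lemma sep_pre5 : sepOK [(['c','t','r','l'], ['C','t','r','l']), (['s','h','i','f','t'], ['S','h','i','f','t']), (['a','l','t'], ['A','l','t']), (['q','u','e','s','t','i','o','n','_','m','a','r','k'], ['?'])] := by
  intro pr hm
  fin_cases hm <;> refine ⟨by simp, by simp, ?_⟩ <;>
    (intro h0 hh0 pr' hm'; simp at hh0; subst hh0; fin_cases hm' <;> simp)

lemma sep_pre6 : sepOK [(['c','t','r','l'], ['C','t','r','l']), (['s','h','i','f','t'], ['S','h','i','f','t']), (['a','l','t'], ['A','l','t']), (['q','u','e','s','t','i','o','n','_','m','a','r','k'], ['?']), (['s','l','a','s','h'], ['/'])] := by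
  intro pr hm
  fin_cases hm <;> refine ⟨by simp, by simp, ?_⟩ <;>
    (intro h0 hh0 pr' hm'; simp at hh0; subst hh0; fin_cases hm' <;> simp)

lemma sep_pre7 : sepOK [(['c','t','r','l'], ['C','t','r','l']), (['s','h','i','f','t'], ['S','h','i','f','t']), (['a','l','t'], ['A','l','t']), (['q','u','e','s','t','i','o','n','_','m','a','r','k'], ['?']), (['s','l','a','s','h'], ['/']), (['e','s','c','a','p','e'], ['E','s','c'])] := by
  intro pr hm
  fin_cases hm <;> refine ⟨by simp, by simp, ?_⟩ <;>
    (intro h0 hh0 pr' hm'; simp at hh0; subst hh0; fin_cases hm' <;> simp)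

lemma sep_post1 : sepOK [(['s','h','i','f','t'], ['S','h','i','f','t']), (['a','l','t'], ['A','l','t']), (['q','u','e','s','t','i','o','n','_','m','a','r','k'], ['?']), (['s','l','a','s','h'], ['/']), (['e','s','c','a','p','e'], ['E','s','c']), (['t','a','b'], ['T','a','b'])] := by
  intro pr hm
  fin_cases hm <;> refine ⟨by simp, by simp, ?_⟩ <;>
    (intro h0 hh0 pr' hm'; simp at hh0; subst hh0; fin_cases hm' <;> simp)

lemma sep_post2 : sepOK [(['a','l','t'], ['A','l','t']), (['q','u','e','s','t','i','o','n','_','m','a','r','k'], ['?']), (['s','l','a','s','h'], ['/']), (['e','s','c','a','p','e'], ['E','s','c']), (['t','a','b'], ['T','a','b'])] := by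
  intro pr hm
  fin_cases hm <;> refine ⟨by simp, by simp, ?_⟩ <;>
    (intro h0 hh0 pr' hm'; simp at hh0; subst hh0; fin_cases hm' <;> simp)

lemma sep_post3 : sepOK [(['q','u','e','s','t','i','o','n','_','m','a','r','k'], ['?']), (['s','l','a','s','h'], ['/']), (['e','s','c','a','p','e'], ['E','s','c']), (['t','a','b'], ['T','a','b'])] := by
  intro pr hm
  fin_cases hm <;> refine ⟨by simp, by simp, ?_⟩ <;>
    (intro h0 hh0 pr' hm'; simp at hh0; subst hh0; fin_cases hm' <;> simp)

lemma sep_post4 : sepOK [(['s','l','a','s','h'], ['/']), (['e','s','c','a','p','e'], ['E','s','c']), (['t','a','b'], ['T','a','b'])] := by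
  intro pr hm
  fin_cases hm <;> refine ⟨by simp, by simp, ?_⟩ <;>
    (intro h0 hh0 pr' hm'; simp at hh0; subst hh0; fin_cases hm' <;> simp)

lemma sep_post5 : sepOK [(['e','s','c','a','p','e'], ['E','s','c']), (['t','a','b'], ['T','a','b'])] := by
  intro pr hm
  fin_cases hm <;> refine ⟨by simp, by simp, ?_⟩ <;>
    (intro h0 hh0 pr' hm'; simp at hh0; subst hh0; fin_cases hm' <;> simp)

lemma sep_post6 : sepOK [(['t','a','b'], ['T','a','b'])] := by
  intro pr hm
  fin_cases hm <;> refine ⟨by simp, by simp, ?_⟩ <;>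
    (intro h0 hh0 pr' hm'; simp at hh0; subst hh0; fin_cases hm' <;> simp)

-- ===== step lemmas: one cascade step equals one scan step =====

lemma step_ctrl (t : List Char) :
    chainRepl fkdPairs (['c','t','r','l'] ++ t) = ['C','t','r','l'] ++ chainRepl fkdPairs t := by
  have hpost : chainRepl [(['s','h','i','f','t'], ['S','h','i','f','t']), (['a','l','t'], ['A','l','t']), (['q','u','e','s','t','i','o','n','_','m','a','r','k'], ['?']), (['s','l','a','s','h'], ['/']), (['e','s','c','a','p','e'], ['E','s','c']), (['t','a','b'], ['T','a','b'])] (['C','t','r','l'] ++ repl ['c','t','r','l'] ['C','t','r','l'] (t))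
      = ['C','t','r','l'] ++ chainRepl [(['s','h','i','f','t'], ['S','h','i','f','t']), (['a','l','t'], ['A','l','t']), (['q','u','e','s','t','i','o','n','_','m','a','r','k'], ['?']), (['s','l','a','s','h'], ['/']), (['e','s','c','a','p','e'], ['E','s','c']), (['t','a','b'], ['T','a','b'])] (repl ['c','t','r','l'] ['C','t','r','l'] (t)) := by
    apply chain_append _ sep_post1
    intro pr hm j hj
    simp only [List.length_cons, List.length_nil] at hj
    fin_cases hm <;> interval_cases j <;> simp
  calc chainRepl fkdPairs (['c','t','r','l'] ++ t)
      = chainRepl [(['s','h','i','f','t'], ['S','h','i','f','t']), (['a','l','t'], ['A','l','t']), (['q','u','e','s','t','i','o','n','_','m','a','r','k'], ['?']), (['s','l','a','s','h'], ['/']), (['e','s','c','a','p','e'], ['E','s','c']), (['t','a','b'], ['T','a','b'])] (repl ['c','t','r','l'] ['C','t','r','l'] ((['c','t','r','l'] ++ t))) := rfl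
    _ = ['C','t','r','l'] ++ chainRepl fkdPairs t := by
        rw [repl_match _ _ _ (by simp), hpost]; rfl

lemma step_shift (t : List Char) (hg : GoodK (['s','h','i','f','t'] ++ t)) :
    chainRepl fkdPairs (['s','h','i','f','t'] ++ t) = ['S','h','i','f','t'] ++ chainRepl fkdPairs t := by
  have habY : ¬ (['a','b'] <+: repl ['s','h','i','f','t'] ['S','h','i','f','t'] (chainRepl [(['c','t','r','l'], ['C','t','r','l'])] t)) := by
    intro hc
    have h1 := pr_shift (by decide) hc
    rw [show chainRepl [(['c','t','r','l'], ['C','t','r','l'])] t = repl ['c','t','r','l'] ['C','t','r','l'] (t) from rfl] at h1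
    have h2 := pr_ctrl (by decide) h1
    obtain ⟨r, hr⟩ := h2
    exact hg.2.1 ⟨[], r, by simp [← hr]⟩
  have hpre : chainRepl [(['c','t','r','l'], ['C','t','r','l'])] (['s','h','i','f','t'] ++ t) = ['s','h','i','f','t'] ++ chainRepl [(['c','t','r','l'], ['C','t','r','l'])] t := by
    apply chain_append _ sep_pre2
    intro pr hm j hj
    simp only [List.length_cons, List.length_nil] at hj
    fin_cases hm <;> interval_cases j <;> simp
  have hpost : chainRepl [(['a','l','t'], ['A','l','t']), (['q','u','e','s','t','i','o','n','_','m','a','r','k'], ['?']), (['s','l','a','s','h'], ['/']), (['e','s','c','a','p','e'], ['E','s','c']), (['t','a','b'], ['T','a','b'])] (['S','h','i','f','t'] ++ repl ['s','h','i','f','t'] ['S','h','i','f','t'] (chainRepl [(['c','t','r','l'], ['C','t','r','l'])] t))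
      = ['S','h','i','f','t'] ++ chainRepl [(['a','l','t'], ['A','l','t']), (['q','u','e','s','t','i','o','n','_','m','a','r','k'], ['?']), (['s','l','a','s','h'], ['/']), (['e','s','c','a','p','e'], ['E','s','c']), (['t','a','b'], ['T','a','b'])] (repl ['s','h','i','f','t'] ['S','h','i','f','t'] (chainRepl [(['c','t','r','l'], ['C','t','r','l'])] t)) := by
    apply chain_append _ sep_post2
    intro pr hm j hj
    simp only [List.length_cons, List.length_nil] at hj
    fin_cases hm <;> interval_cases j <;> (try simp)
    intro hc
    try simp at hc
    first
    | exact habY hc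
    | exact habY hc.2
  calc chainRepl fkdPairs (['s','h','i','f','t'] ++ t)
      = chainRepl [(['a','l','t'], ['A','l','t']), (['q','u','e','s','t','i','o','n','_','m','a','r','k'], ['?']), (['s','l','a','s','h'], ['/']), (['e','s','c','a','p','e'], ['E','s','c']), (['t','a','b'], ['T','a','b'])] (repl ['s','h','i','f','t'] ['S','h','i','f','t'] (chainRepl [(['c','t','r','l'], ['C','t','r','l'])] (['s','h','i','f','t'] ++ t))) := rfl
    _ = ['S','h','i','f','t'] ++ chainRepl fkdPairs t := by
        rw [hpre, repl_match _ _ _ (by simp), hpost]; rfl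

lemma step_alt (t : List Char) (hg : GoodK (['a','l','t'] ++ t)) :
    chainRepl fkdPairs (['a','l','t'] ++ t) = ['A','l','t'] ++ chainRepl fkdPairs t := by
  have habY : ¬ (['a','b'] <+: repl ['a','l','t'] ['A','l','t'] (chainRepl [(['c','t','r','l'], ['C','t','r','l']), (['s','h','i','f','t'], ['S','h','i','f','t'])] t)) := by
    intro hc
    have h1 := pr_alt (by decide) hc
    rw [show chainRepl [(['c','t','r','l'], ['C','t','r','l']), (['s','h','i','f','t'], ['S','h','i','f','t'])] t = repl ['s','h','i','f','t'] ['S','h','i','f','t'] (repl ['c','t','r','l'] ['C','t','r','l'] (t)) from rfl] at h1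
    have h2 := pr_shift (by decide) h1
    have h3 := pr_ctrl (by decide) h2
    obtain ⟨r, hr⟩ := h3
    exact hg.1 ⟨[], r, by simp [← hr]⟩
  have hpre : chainRepl [(['c','t','r','l'], ['C','t','r','l']), (['s','h','i','f','t'], ['S','h','i','f','t'])] (['a','l','t'] ++ t) = ['a','l','t'] ++ chainRepl [(['c','t','r','l'], ['C','t','r','l']), (['s','h','i','f','t'], ['S','h','i','f','t'])] t := by
    apply chain_append _ sep_pre3
    intro pr hm j hj
    simp only [List.length_cons, List.length_nil] at hj
    fin_cases hm <;> interval_cases j <;> simp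
  have hpost : chainRepl [(['q','u','e','s','t','i','o','n','_','m','a','r','k'], ['?']), (['s','l','a','s','h'], ['/']), (['e','s','c','a','p','e'], ['E','s','c']), (['t','a','b'], ['T','a','b'])] (['A','l','t'] ++ repl ['a','l','t'] ['A','l','t'] (chainRepl [(['c','t','r','l'], ['C','t','r','l']), (['s','h','i','f','t'], ['S','h','i','f','t'])] t))
      = ['A','l','t'] ++ chainRepl [(['q','u','e','s','t','i','o','n','_','m','a','r','k'], ['?']), (['s','l','a','s','h'], ['/']), (['e','s','c','a','p','e'], ['E','s','c']), (['t','a','b'], ['T','a','b'])] (repl ['a','l','t'] ['A','l','t'] (chainRepl [(['c','t','r','l'], ['C','t','r','l']), (['s','h','i','f','t'], ['S','h','i','f','t'])] t)) := by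
    apply chain_append _ sep_post3
    intro pr hm j hj
    simp only [List.length_cons, List.length_nil] at hj
    fin_cases hm <;> interval_cases j <;> (try simp)
    intro hc
    try simp at hc
    first
    | exact habY hc
    | exact habY hc.2
  calc chainRepl fkdPairs (['a','l','t'] ++ t)
      = chainRepl [(['q','u','e','s','t','i','o','n','_','m','a','r','k'], ['?']), (['s','l','a','s','h'], ['/']), (['e','s','c','a','p','e'], ['E','s','c']), (['t','a','b'], ['T','a','b'])] (repl ['a','l','t'] ['A','l','t'] (chainRepl [(['c','t','r','l'], ['C','t','r','l']), (['s','h','i','f','t'], ['S','h','i','f','t'])] (['a','l','t'] ++ t))) := rfl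
    _ = ['A','l','t'] ++ chainRepl fkdPairs t := by
        rw [hpre, repl_match _ _ _ (by simp), hpost]; rfl

lemma step_qm (t : List Char) :
    chainRepl fkdPairs (['q','u','e','s','t','i','o','n','_','m','a','r','k'] ++ t) = ['?'] ++ chainRepl fkdPairs t := by
  have hpre : chainRepl [(['c','t','r','l'], ['C','t','r','l']), (['s','h','i','f','t'], ['S','h','i','f','t']), (['a','l','t'], ['A','l','t'])] (['q','u','e','s','t','i','o','n','_','m','a','r','k'] ++ t) = ['q','u','e','s','t','i','o','n','_','m','a','r','k'] ++ chainRepl [(['c','t','r','l'], ['C','t','r','l']), (['s','h','i','f','t'], ['S','h','i','f','t']), (['a','l','t'], ['A','l','t'])] t := by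
    apply chain_append _ sep_pre4
    intro pr hm j hj
    simp only [List.length_cons, List.length_nil] at hj
    fin_cases hm <;> interval_cases j <;> simp
  have hpost : chainRepl [(['s','l','a','s','h'], ['/']), (['e','s','c','a','p','e'], ['E','s','c']), (['t','a','b'], ['T','a','b'])] (['?'] ++ repl ['q','u','e','s','t','i','o','n','_','m','a','r','k'] ['?'] (chainRepl [(['c','t','r','l'], ['C','t','r','l']), (['s','h','i','f','t'], ['S','h','i','f','t']), (['a','l','t'], ['A','l','t'])] t))
      = ['?'] ++ chainRepl [(['s','l','a','s','h'], ['/']), (['e','s','c','a','p','e'], ['E','s','c']), (['t','a','b'], ['T','a','b'])] (repl ['q','u','e','s','t','i','o','n','_','m','a','r','k'] ['?'] (chainRepl [(['c','t','r','l'], ['C','t','r','l']), (['s','h','i','f','t'], ['S','h','i','f','t']), (['a','l','t'], ['A','l','t'])] t)) := by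
    apply chain_append _ sep_post4
    intro pr hm j hj
    simp only [List.length_cons, List.length_nil] at hj
    fin_cases hm <;> interval_cases j <;> simp
  calc chainRepl fkdPairs (['q','u','e','s','t','i','o','n','_','m','a','r','k'] ++ t)
      = chainRepl [(['s','l','a','s','h'], ['/']), (['e','s','c','a','p','e'], ['E','s','c']), (['t','a','b'], ['T','a','b'])] (repl ['q','u','e','s','t','i','o','n','_','m','a','r','k'] ['?'] (chainRepl [(['c','t','r','l'], ['C','t','r','l']), (['s','h','i','f','t'], ['S','h','i','f','t']), (['a','l','t'], ['A','l','t'])] (['q','u','e','s','t','i','o','n','_','m','a','r','k'] ++ t))) := rfl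
    _ = ['?'] ++ chainRepl fkdPairs t := by
        rw [hpre, repl_match _ _ _ (by simp), hpost]; rfl

lemma step_slash (t : List Char) (hg : GoodK (['s','l','a','s','h'] ++ t)) :
    chainRepl fkdPairs (['s','l','a','s','h'] ++ t) = ['/'] ++ chainRepl fkdPairs t := by
  have hpre : chainRepl [(['c','t','r','l'], ['C','t','r','l']), (['s','h','i','f','t'], ['S','h','i','f','t']), (['a','l','t'], ['A','l','t']), (['q','u','e','s','t','i','o','n','_','m','a','r','k'], ['?'])] (['s','l','a','s','h'] ++ t) = ['s','l','a','s','h'] ++ chainRepl [(['c','t','r','l'], ['C','t','r','l']), (['s','h','i','f','t'], ['S','h','i','f','t']), (['a','l','t'], ['A','l','t']), (['q','u','e','s','t','i','o','n','_','m','a','r','k'], ['?'])] t := by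
    apply chain_append _ sep_pre5
    intro pr hm j hj
    simp only [List.length_cons, List.length_nil] at hj
    fin_cases hm <;> interval_cases j <;> (try simp)
    intro hc
    try simp at hc
    first
    | (obtain ⟨r, hr⟩ := hc; exact hg.2.2 ⟨[], r, by simp [← hr]⟩)
    | (obtain ⟨r, hr⟩ := hc.2.2; exact hg.2.2 ⟨[], r, by simp [← hr]⟩)
  have hpost : chainRepl [(['e','s','c','a','p','e'], ['E','s','c']), (['t','a','b'], ['T','a','b'])] (['/'] ++ repl ['s','l','a','s','h'] ['/'] (chainRepl [(['c','t','r','l'], ['C','t','r','l']), (['s','h','i','f','t'], ['S','h','i','f','t']), (['a','l','t'], ['A','l','t']), (['q','u','e','s','t','i','o','n','_','m','a','r','k'], ['?'])] t))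
      = ['/'] ++ chainRepl [(['e','s','c','a','p','e'], ['E','s','c']), (['t','a','b'], ['T','a','b'])] (repl ['s','l','a','s','h'] ['/'] (chainRepl [(['c','t','r','l'], ['C','t','r','l']), (['s','h','i','f','t'], ['S','h','i','f','t']), (['a','l','t'], ['A','l','t']), (['q','u','e','s','t','i','o','n','_','m','a','r','k'], ['?'])] t)) := by
    apply chain_append _ sep_post5
    intro pr hm j hj
    simp only [List.length_cons, List.length_nil] at hj
    fin_cases hm <;> interval_cases j <;> simp
  calc chainRepl fkdPairs (['s','l','a','s','h'] ++ t)
      = chainRepl [(['e','s','c','a','p','e'], ['E','s','c']), (['t','a','b'], ['T','a','b'])] (repl ['s','l','a','s','h'] ['/'] (chainRepl [(['c','t','r','l'], ['C','t','r','l']), (['s','h','i','f','t'], ['S','h','i','f','t']), (['a','l','t'], ['A','l','t']), (['q','u','e','s','t','i','o','n','_','m','a','r','k'], ['?'])] (['s','l','a','s','h'] ++ t))) := rfl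
    _ = ['/'] ++ chainRepl fkdPairs t := by
        rw [hpre, repl_match _ _ _ (by simp), hpost]; rfl

lemma step_esc (t : List Char) :
    chainRepl fkdPairs (['e','s','c','a','p','e'] ++ t) = ['E','s','c'] ++ chainRepl fkdPairs t := by
  have hpre : chainRepl [(['c','t','r','l'], ['C','t','r','l']), (['s','h','i','f','t'], ['S','h','i','f','t']), (['a','l','t'], ['A','l','t']), (['q','u','e','s','t','i','o','n','_','m','a','r','k'], ['?']), (['s','l','a','s','h'], ['/'])] (['e','s','c','a','p','e'] ++ t) = ['e','s','c','a','p','e'] ++ chainRepl [(['c','t','r','l'], ['C','t','r','l']), (['s','h','i','f','t'], ['S','h','i','f','t']), (['a','l','t'], ['A','l','t']), (['q','u','e','s','t','i','o','n','_','m','a','r','k'], ['?']), (['s','l','a','s','h'], ['/'])] t := by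
    apply chain_append _ sep_pre6
    intro pr hm j hj
    simp only [List.length_cons, List.length_nil] at hj
    fin_cases hm <;> interval_cases j <;> simp
  have hpost : chainRepl [(['t','a','b'], ['T','a','b'])] (['E','s','c'] ++ repl ['e','s','c','a','p','e'] ['E','s','c'] (chainRepl [(['c','t','r','l'], ['C','t','r','l']), (['s','h','i','f','t'], ['S','h','i','f','t']), (['a','l','t'], ['A','l','t']), (['q','u','e','s','t','i','o','n','_','m','a','r','k'], ['?']), (['s','l','a','s','h'], ['/'])] t))
      = ['E','s','c'] ++ chainRepl [(['t','a','b'], ['T','a','b'])] (repl ['e','s','c','a','p','e'] ['E','s','c'] (chainRepl [(['c','t','r','l'], ['C','t','r','l']), (['s','h','i','f','t'], ['S','h','i','f','t']), (['a','l','t'], ['A','l','t']), (['q','u','e','s','t','i','o','n','_','m','a','r','k'], ['?']), (['s','l','a','s','h'], ['/'])] t)) := by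
    apply chain_append _ sep_post6
    intro pr hm j hj
    simp only [List.length_cons, List.length_nil] at hj
    fin_cases hm <;> interval_cases j <;> simp
  calc chainRepl fkdPairs (['e','s','c','a','p','e'] ++ t)
      = chainRepl [(['t','a','b'], ['T','a','b'])] (repl ['e','s','c','a','p','e'] ['E','s','c'] (chainRepl [(['c','t','r','l'], ['C','t','r','l']), (['s','h','i','f','t'], ['S','h','i','f','t']), (['a','l','t'], ['A','l','t']), (['q','u','e','s','t','i','o','n','_','m','a','r','k'], ['?']), (['s','l','a','s','h'], ['/'])] (['e','s','c','a','p','e'] ++ t))) := rfl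
    _ = ['E','s','c'] ++ chainRepl fkdPairs t := by
        rw [hpre, repl_match _ _ _ (by simp), hpost]; rfl

lemma step_tab (t : List Char) :
    chainRepl fkdPairs (['t','a','b'] ++ t) = ['T','a','b'] ++ chainRepl fkdPairs t := by
  have hpre : chainRepl [(['c','t','r','l'], ['C','t','r','l']), (['s','h','i','f','t'], ['S','h','i','f','t']), (['a','l','t'], ['A','l','t']), (['q','u','e','s','t','i','o','n','_','m','a','r','k'], ['?']), (['s','l','a','s','h'], ['/']), (['e','s','c','a','p','e'], ['E','s','c'])] (['t','a','b'] ++ t) = ['t','a','b'] ++ chainRepl [(['c','t','r','l'], ['C','t','r','l']), (['s','h','i','f','t'], ['S','h','i','f','t']), (['a','l','t'], ['A','l','t']), (['q','u','e','s','t','i','o','n','_','m','a','r','k'], ['?']), (['s','l','a','s','h'], ['/']), (['e','s','c','a','p','e'], ['E','s','c'])] t := by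
    apply chain_append _ sep_pre7
    intro pr hm j hj
    simp only [List.length_cons, List.length_nil] at hj
    fin_cases hm <;> interval_cases j <;> simp
  calc chainRepl fkdPairs (['t','a','b'] ++ t)
      = chainRepl [] (repl ['t','a','b'] ['T','a','b'] (chainRepl [(['c','t','r','l'], ['C','t','r','l']), (['s','h','i','f','t'], ['S','h','i','f','t']), (['a','l','t'], ['A','l','t']), (['q','u','e','s','t','i','o','n','_','m','a','r','k'], ['?']), (['s','l','a','s','h'], ['/']), (['e','s','c','a','p','e'], ['E','s','c'])] (['t','a','b'] ++ t))) := rfl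
    _ = ['T','a','b'] ++ chainRepl fkdPairs t := by
        rw [hpre, repl_match _ _ _ (by simp)]; rfl

-- ===== scan-side step equations =====

lemma scan_none (n : Nat) (c : Char) (t : List Char)
    (h1 : ¬ (['c','t','r','l'] <+: c :: t)) (h2 : ¬ (['s','h','i','f','t'] <+: c :: t))
    (h3 : ¬ (['a','l','t'] <+: c :: t))
    (h4 : ¬ (['q','u','e','s','t','i','o','n','_','m','a','r','k'] <+: c :: t))
    (h5 : ¬ (['s','l','a','s','h'] <+: c :: t)) (h6 : ¬ (['e','s','c','a','p','e'] <+: c :: t))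
    (h7 : ¬ (['t','a','b'] <+: c :: t)) :
    fkdScanGo (n + 1) (c :: t) = c :: fkdScanGo n t := by
  simp only [fkdScanGo]
  rw [if_neg (by simp only [PySem.Chars.startswith_iff]; exact h1),
    if_neg (by simp only [PySem.Chars.startswith_iff]; exact h2),
    if_neg (by simp only [PySem.Chars.startswith_iff]; exact h3),
    if_neg (by simp only [PySem.Chars.startswith_iff]; exact h4),
    if_neg (by simp only [PySem.Chars.startswith_iff]; exact h5),
    if_neg (by simp only [PySem.Chars.startswith_iff]; exact h6),
    if_neg (by simp only [PySem.Chars.startswith_iff]; exact h7)]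

lemma scan_ctrl (n : Nat) (t : List Char) :
    fkdScanGo (n + 1) (['c','t','r','l'] ++ t) = ['C','t','r','l'] ++ fkdScanGo n t := by
  rw [show ['c','t','r','l'] ++ t = 'c' :: ('t' :: 'r' :: 'l' :: t) from rfl]
  simp only [fkdScanGo]
  rw [if_pos (by simp [PySem.Chars.startswith_iff])]
  simp

lemma scan_shift (n : Nat) (t : List Char) :
    fkdScanGo (n + 1) (['s','h','i','f','t'] ++ t) = ['S','h','i','f','t'] ++ fkdScanGo n t := by
  rw [show ['s','h','i','f','t'] ++ t = 's' :: ('h' :: 'i' :: 'f' :: 't' :: t) from rfl]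
  simp only [fkdScanGo]
  rw [if_neg (by simp [PySem.Chars.startswith_iff]),
    if_pos (by simp [PySem.Chars.startswith_iff])]
  simp

lemma scan_alt (n : Nat) (t : List Char) :
    fkdScanGo (n + 1) (['a','l','t'] ++ t) = ['A','l','t'] ++ fkdScanGo n t := by
  rw [show ['a','l','t'] ++ t = 'a' :: ('l' :: 't' :: t) from rfl]
  simp only [fkdScanGo]
  rw [if_neg (by simp [PySem.Chars.startswith_iff]),
    if_neg (by simp [PySem.Chars.startswith_iff]),
    if_pos (by simp [PySem.Chars.startswith_iff])]
  simp

lemma scan_qm (n : Nat) (t : List Char) :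
    fkdScanGo (n + 1) (['q','u','e','s','t','i','o','n','_','m','a','r','k'] ++ t) = ['?'] ++ fkdScanGo n t := by
  rw [show ['q','u','e','s','t','i','o','n','_','m','a','r','k'] ++ t = 'q' :: ('u' :: 'e' :: 's' :: 't' :: 'i' :: 'o' :: 'n' :: '_' :: 'm' :: 'a' :: 'r' :: 'k' :: t) from rfl]
  simp only [fkdScanGo]
  rw [if_neg (by simp [PySem.Chars.startswith_iff]),
    if_neg (by simp [PySem.Chars.startswith_iff]),
    if_neg (by simp [PySem.Chars.startswith_iff]),
    if_pos (by simp [PySem.Chars.startswith_iff])]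
  simp

lemma scan_slash (n : Nat) (t : List Char) :
    fkdScanGo (n + 1) (['s','l','a','s','h'] ++ t) = ['/'] ++ fkdScanGo n t := by
  rw [show ['s','l','a','s','h'] ++ t = 's' :: ('l' :: 'a' :: 's' :: 'h' :: t) from rfl]
  simp only [fkdScanGo]
  rw [if_neg (by simp [PySem.Chars.startswith_iff]),
    if_neg (by simp [PySem.Chars.startswith_iff]),
    if_neg (by simp [PySem.Chars.startswith_iff]),
    if_neg (by simp [PySem.Chars.startswith_iff]),
    if_pos (by simp [PySem.Chars.startswith_iff])]
  simp

lemma scan_esc (n : Nat) (t : List Char) :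
    fkdScanGo (n + 1) (['e','s','c','a','p','e'] ++ t) = ['E','s','c'] ++ fkdScanGo n t := by
  rw [show ['e','s','c','a','p','e'] ++ t = 'e' :: ('s' :: 'c' :: 'a' :: 'p' :: 'e' :: t) from rfl]
  simp only [fkdScanGo]
  rw [if_neg (by simp [PySem.Chars.startswith_iff]),
    if_neg (by simp [PySem.Chars.startswith_iff]),
    if_neg (by simp [PySem.Chars.startswith_iff]),
    if_neg (by simp [PySem.Chars.startswith_iff]),
    if_neg (by simp [PySem.Chars.startswith_iff]),
    if_pos (by simp [PySem.Chars.startswith_iff])]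
  simp

lemma scan_tab (n : Nat) (t : List Char) :
    fkdScanGo (n + 1) (['t','a','b'] ++ t) = ['T','a','b'] ++ fkdScanGo n t := by
  rw [show ['t','a','b'] ++ t = 't' :: ('a' :: 'b' :: t) from rfl]
  simp only [fkdScanGo]
  rw [if_neg (by simp [PySem.Chars.startswith_iff]),
    if_neg (by simp [PySem.Chars.startswith_iff]),
    if_neg (by simp [PySem.Chars.startswith_iff]),
    if_neg (by simp [PySem.Chars.startswith_iff]),
    if_neg (by simp [PySem.Chars.startswith_iff]),
    if_neg (by simp [PySem.Chars.startswith_iff]),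
    if_pos (by simp [PySem.Chars.startswith_iff])]
  simp

-- ===== the main equivalence on lists =====

lemma good_drop {p t : List Char} (hg : GoodK (p ++ t)) : GoodK t :=
  good_mono (List.suffix_append p t).isInfix hg

lemma cascade_eq_scan :
    ∀ (n : Nat) (l : List Char), l.length ≤ n → GoodK l →
      chainRepl fkdPairs l = fkdScanGo n l := by
  intro n
  induction n with
  | zero =>
    intro l hl _
    have : l = [] := by cases l <;> simp_all
    subst this
    simp [chainRepl, fkdPairs, repl_nil, fkdScanGo]
  | succ n ih =>
    intro l hl hg
    cases l with
    | nil => simp [chainRepl, fkdPairs, repl_nil, fkdScanGo]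
    | cons c t =>
      simp only [List.length_cons, Nat.add_le_add_iff_right] at hl
      by_cases h1 : ['c','t','r','l'] <+: c :: t
      · obtain ⟨r, hr⟩ := h1
        rw [← hr] at hg ⊢
        rw [step_ctrl, scan_ctrl,
          ih r (by have := congrArg List.length hr; simp at this; omega) (good_drop hg)]
      by_cases h2 : ['s','h','i','f','t'] <+: c :: t
      · obtain ⟨r, hr⟩ := h2
        rw [← hr] at hg ⊢
        rw [step_shift r hg, scan_shift,
          ih r (by have := congrArg List.length hr; simp at this; omega) (good_drop hg)]
      by_cases h3 : ['a','l','t'] <+: c :: t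
      · obtain ⟨r, hr⟩ := h3
        rw [← hr] at hg ⊢
        rw [step_alt r hg, scan_alt,
          ih r (by have := congrArg List.length hr; simp at this; omega) (good_drop hg)]
      by_cases h4 : ['q','u','e','s','t','i','o','n','_','m','a','r','k'] <+: c :: t
      · obtain ⟨r, hr⟩ := h4
        rw [← hr] at hg ⊢
        rw [step_qm, scan_qm,
          ih r (by have := congrArg List.length hr; simp at this; omega) (good_drop hg)]
      by_cases h5 : ['s','l','a','s','h'] <+: c :: t
      · obtain ⟨r, hr⟩ := h5
        rw [← hr] at hg ⊢
        rw [step_slash r hg, scan_slash,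
          ih r (by have := congrArg List.length hr; simp at this; omega) (good_drop hg)]
      by_cases h6 : ['e','s','c','a','p','e'] <+: c :: t
      · obtain ⟨r, hr⟩ := h6
        rw [← hr] at hg ⊢
        rw [step_esc, scan_esc,
          ih r (by have := congrArg List.length hr; simp at this; omega) (good_drop hg)]
      by_cases h7 : ['t','a','b'] <+: c :: t
      · obtain ⟨r, hr⟩ := h7
        rw [← hr] at hg ⊢
        rw [step_tab, scan_tab,
          ih r (by have := congrArg List.length hr; simp at this; omega) (good_drop hg)]
      rw [scan_none n c t h1 h2 h3 h4 h5 h6 h7,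
        chain_cons fkdPairs sep_all c t
          (by intro pr hm; fin_cases hm <;> assumption),
        ih t hl (good_mono (List.suffix_cons c t).isInfix hg)]

-- ===== glue back to the two string ports =====

theorem fkd_equal (key : String) (hpre : Pre_format_key_for_display key) :
    format_key_for_display key = format_key_for_display_alt key := by
  obtain ⟨ha, hs, hl⟩ := hpre
  have hg : GoodK key.toList := by
    rw [PySem.Str.isIn_eq] at ha hs hl
    refine ⟨?_, ?_, ?_⟩
    · have h := (PySem.Chars.isIn_eq_false_iff _ _).mp ha
      rwa [show ("altab" : String).toList = ['a','l','t','a','b'] from by decide] at h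
    · have h := (PySem.Chars.isIn_eq_false_iff _ _).mp hs
      rwa [show ("shiftab" : String).toList = ['s','h','i','f','t','a','b'] from by decide] at h
    · have h := (PySem.Chars.isIn_eq_false_iff _ _).mp hl
      rwa [show ("slashift" : String).toList = ['s','l','a','s','h','i','f','t'] from by decide] at h
  have hA : (List.foldl (fun r (pr : String × String) => PySem.Str.replace r pr.1 pr.2) key
      [("ctrl", "Ctrl"), ("shift", "Shift"), ("alt", "Alt"), ("question_mark", "?"),
       ("slash", "/"), ("escape", "Esc"), ("tab", "Tab")])
      = String.ofList (chainRepl fkdPairs key.toList) := by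
    simp only [List.foldl, PySem.Str.replace, String.toList_ofList]
    rw [replace_eq_repl _ _ _ (by decide), replace_eq_repl _ _ _ (by decide),
      replace_eq_repl _ _ _ (by decide), replace_eq_repl _ _ _ (by decide),
      replace_eq_repl _ _ _ (by decide), replace_eq_repl _ _ _ (by decide),
      replace_eq_repl _ _ _ (by decide)]
    rfl
  have hmain := cascade_eq_scan key.toList.length key.toList le_rfl hg
  simp only [format_key_for_display, format_key_for_display_alt]
  rw [hA, hmain]

-- ===== VERDICT (by name: the statement is the Claim_ definition above) =====
theorem format_key_for_display_spec : Claim_equal_format_key_for_display := by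
  intro key _ hpre
  unfold Spec_format_key_for_display
  exact fkd_equal key hpre
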